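-- pv_equiv track=rewrite | github.com/dprgarner/codejam | 2021/1c/roaring.py | is_roaring
-- ===== SOURCE A (Python) =====
-- def is_roaring(year):
--     digits = len(str(year))
--
--     for l in range(1, digits):
--         year_str = str(year)
--         c = int(year_str[:l])
--
--         candidate = str(c)
--         while len(candidate) < digits:
--             candidate = "{}{}".format(candidate, c + 1)
--             c += 1
--         if int(candidate) == year:
--             return True
--     return False
-- ===== SOURCE B (Python) =====
-- def is_roaring(year):
--     s = str(year)
--     n = len(s)
--     for l in range(1, n):
--         c = int(s[:l])
--         idx = 0
--         while idx < n:
--             t = str(c)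
--             if s[idx:idx + len(t)] != t:
--                 break
--             idx += len(t)
--             c += 1
--         if idx >= n:
--             return True
--     return False
-- ===== Notes on version B (the rewrite author's own statement) =====
-- stated objective: alternative
-- what changed: Instead of building each candidate string by repeated concatenation and comparing integers, B scans the input string in place with an index, matching the decimal form of each successive expected integer against the corresponding slice and succeeding exactly when the index lands on the end.
import Mathlib
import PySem

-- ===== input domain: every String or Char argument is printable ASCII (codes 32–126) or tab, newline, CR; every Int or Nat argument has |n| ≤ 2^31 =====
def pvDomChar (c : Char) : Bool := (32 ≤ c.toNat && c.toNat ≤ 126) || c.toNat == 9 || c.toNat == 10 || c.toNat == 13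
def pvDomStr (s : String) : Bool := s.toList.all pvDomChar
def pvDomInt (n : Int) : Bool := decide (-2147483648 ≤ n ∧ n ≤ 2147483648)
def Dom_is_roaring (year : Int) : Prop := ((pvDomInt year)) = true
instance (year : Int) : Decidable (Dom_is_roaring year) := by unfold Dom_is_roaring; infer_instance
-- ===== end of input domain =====

-- B differs from A only in structure: A rebuilds a candidate string by concatenation and compares
-- integers; B matches each successive number's decimal form in place against slices of str(year).

-- str(n) is never the empty string (needed for termination of both loops below)
theorem pvToChars_ne_nil (n : Int) : PySem.Int.toChars n ≠ [] := by
  unfold PySem.Int.toChars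
  split
  · simp
  · have h10 : (1:Nat) < 10 := by norm_num
    rw [Nat.toDigits_eq_if h10]
    split <;> simp

-- ===== PORT A =====
-- while len(candidate) < digits: candidate = "{}{}".format(candidate, c + 1); c += 1
def pvBuild (digits : Nat) (cand : List Char) (c : Int) : List Char :=
  if _h : cand.length < digits then
    pvBuild digits (cand ++ PySem.Int.toChars (c + 1)) (c + 1)
  else cand
termination_by digits - cand.length
decreasing_by
  have := pvToChars_ne_nil (c + 1)
  have : 0 < (PySem.Int.toChars (c + 1)).length := List.length_pos_iff.mpr this
  simp only [List.length_append]
  omega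

-- for l in range(1, digits): ... (early return True)
def pvLoopA (year : Int) (ys : List Char) (digits : Nat) : List Int → Bool
  | [] => false
  | l :: ls =>
    match PySem.Int.ofChars? (PySem.List.slice ys none (some l)) with
    | none => false  -- Python raises ValueError here (only outside Pre_: negative year)
    | some c =>
      let cand := pvBuild digits (PySem.Int.toChars c) c
      -- int(candidate) never raises here (candidate is all digits), so the `none` arm is dead
      if PySem.Int.ofChars? cand = some year then true else pvLoopA year ys digits ls

def is_roaring (year : Int) : Bool :=
  let digits := (PySem.Int.toChars year).length
  pvLoopA year (PySem.Int.toChars year) digits (PySem.List.pyRange 1 (digits : Int))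

-- ===== PORT B =====
-- while idx < n: t = str(c); if s[idx:idx+len(t)] != t: break; idx += len(t); c += 1
def pvMatch (s : List Char) (n : Nat) (c : Int) (idx : Nat) : Nat :=
  if _h : idx < n then
    let t := PySem.Int.toChars c
    if PySem.List.slice s (some (idx : Int)) (some ((idx : Int) + (t.length : Int))) = t then
      pvMatch s n (c + 1) (idx + t.length)
    else idx
  else idx
termination_by n - idx
decreasing_by
  have := pvToChars_ne_nil c
  have : 0 < (PySem.Int.toChars c).length := List.length_pos_iff.mpr this
  omega

def pvLoopB (s : List Char) (n : Nat) : List Int → Bool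
  | [] => false
  | l :: ls =>
    match PySem.Int.ofChars? (PySem.List.slice s none (some l)) with
    | none => false  -- Python raises ValueError here (only outside Pre_: negative year)
    | some c =>
      if n ≤ pvMatch s n c 0 then true else pvLoopB s n ls

def is_roaring_alt (year : Int) : Bool :=
  let s := PySem.Int.toChars year
  let n := s.length
  pvLoopB s n (PySem.List.pyRange 1 (n : Int))

-- ===== PRECONDITION & SPEC =====
-- Pre_ excludes exactly the negative years, on which Python's int(str(year)[:1]) = int('-')
-- raises ValueError (in A and in B alike).
def Pre_is_roaring (year : Int) : Prop := 0 ≤ year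
instance (year : Int) : Decidable (Pre_is_roaring year) := by unfold Pre_is_roaring; infer_instance
def pvWitness_is_roaring : Int := (1213)

def Spec_is_roaring (year : Int) (out : Bool) : Prop := out = is_roaring_alt year
instance (year : Int) (out : Bool) : Decidable (Spec_is_roaring year out) := by unfold Spec_is_roaring; infer_instance

-- ===== CLAIM (what is proved, stated in full; the proofs are below) =====
def Claim_equal_is_roaring : Prop := ∀ (year : Int), Dom_is_roaring year → Pre_is_roaring year → Spec_is_roaring year (is_roaring year)

-- ===== LEMMAS AND PROOFS =====
def pvDv (c : Char) : Nat := c.toNat - 48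
def pvV (a : Nat) (ds : List Char) : Nat := ds.foldl (fun a c => a * 10 + pvDv c) a
def pvCanon (ds : List Char) : Prop := (∀ c ∈ ds, c.isDigit) ∧ ds ≠ [] ∧ ds.head? ≠ some '0'

theorem pvDigit_toNat (c : Char) (h : c.isDigit) : 48 ≤ c.toNat ∧ c.toNat ≤ 57 := by
  revert h; simp [Char.isDigit, UInt32.le_iff_toNat_le]

theorem pvChar_eq_of_toNat (c d : Char) (h : c.toNat = d.toNat) : c = d := by
  have : c.val.toNat = d.val.toNat := h
  exact Char.ext (by exact UInt32.toNat_inj.mp this)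

theorem pvDigitChar_isDigit (k : Nat) (h : k < 10) : (Nat.digitChar k).isDigit := by
  interval_cases k <;> decide

theorem pvDigitChar_dv (c : Char) (h : c.isDigit) : Nat.digitChar (c.toNat - 48) = c := by
  obtain ⟨h1, h2⟩ := pvDigit_toNat c h
  apply pvChar_eq_of_toNat
  have hk : c.toNat - 48 < 10 := by omega
  interval_cases hck : (c.toNat - 48) <;> simp [Nat.digitChar] <;> omega

theorem pvDv_digitChar (k : Nat) (h : k < 10) : pvDv (Nat.digitChar k) = k := by
  interval_cases k <;> decide

theorem pvTD_ne_nil (m : Nat) : Nat.toDigits 10 m ≠ [] := by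
  rw [Nat.toDigits_eq_if (by norm_num)]
  split <;> simp

theorem pvTD_digits (m : Nat) : ∀ c ∈ Nat.toDigits 10 m, c.isDigit := by
  induction m using Nat.strong_induction_on with
  | _ m ih =>
    rw [Nat.toDigits_eq_if (by norm_num)]
    split
    · intro c hc
      rw [List.mem_singleton] at hc
      subst hc
      exact pvDigitChar_isDigit _ (by omega)
    · intro c hc
      rcases List.mem_append.mp hc with h1 | h2
      · exact ih (m / 10) (by omega) c h1
      · rw [List.mem_singleton] at h2
        subst h2
        exact pvDigitChar_isDigit _ (by omega)

theorem pvV_append (a : Nat) (xs : List Char) (d : Char) :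
    pvV a (xs ++ [d]) = pvV a xs * 10 + pvDv d := by
  simp [pvV, List.foldl_append]

theorem pvTD_V (m : Nat) : pvV 0 (Nat.toDigits 10 m) = m := by
  induction m using Nat.strong_induction_on with
  | _ m ih =>
    rw [Nat.toDigits_eq_if (by norm_num)]
    split
    · simp [pvV, pvDv_digitChar m (by omega)]
    · rw [pvV_append, ih (m / 10) (by omega), pvDv_digitChar _ (by omega)]
      omega

theorem pvTD_head (m : Nat) (h : 0 < m) : (Nat.toDigits 10 m).head? ≠ some '0' := by
  induction m using Nat.strong_induction_on with
  | _ m ih =>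
    rw [Nat.toDigits_eq_if (by norm_num)]
    split
    · rename_i hlt
      simp only [List.head?_cons]
      intro hc
      have := pvDv_digitChar m (by omega)
      rw [Option.some.injEq] at hc
      rw [hc] at this
      simp [pvDv] at this
      omega
    · rename_i hge
      rw [List.head?_append_of_ne_nil _ (pvTD_ne_nil _)]
      exact ih (m / 10) (by omega) (by omega)

theorem pvTD_canon (m : Nat) (h : 0 < m) : pvCanon (Nat.toDigits 10 m) :=
  ⟨pvTD_digits m, pvTD_ne_nil m, pvTD_head m h⟩

theorem pvV_ge (a : Nat) (ds : List Char) : a ≤ pvV a ds := by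
  induction ds generalizing a with
  | nil => simp [pvV]
  | cons c cs ih =>
    have := ih (a * 10 + pvDv c)
    simp only [pvV, List.foldl_cons] at *
    omega

theorem pvV_pos (ds : List Char) (h : pvCanon ds) : 0 < pvV 0 ds := by
  obtain ⟨hd, hne, hh⟩ := h
  obtain ⟨c, cs, rfl⟩ : ∃ c cs, ds = c :: cs := by
    cases ds with
    | nil => exact absurd rfl hne
    | cons a b => exact ⟨a, b, rfl⟩
  have h1 := pvDigit_toNat c (hd c (by simp))
  have hc0 : c ≠ '0' := by simpa using hh
  have : 1 ≤ pvDv c := by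
    simp only [pvDv]
    rcases Nat.lt_or_ge 48 c.toNat with h | h
    · omega
    · exfalso; exact hc0 (pvChar_eq_of_toNat c '0' (by simpa using by omega))
  calc 0 < pvDv c := this
    _ ≤ pvV (0 * 10 + pvDv c) cs := by simpa using pvV_ge _ cs
    _ = pvV 0 (c :: cs) := by simp [pvV]

theorem pvCanon_toDigits (ds : List Char) (h : pvCanon ds) :
    Nat.toDigits 10 (pvV 0 ds) = ds := by
  induction ds using List.reverseRecOn with
  | nil => exact absurd rfl h.2.1
  | append_singleton xs d ih =>
    obtain ⟨hdig, -, hh⟩ := h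
    have hd : d.isDigit := hdig d (by simp)
    have hdv : pvDv d < 10 := by
      have := pvDigit_toNat d hd; simp [pvDv]; omega
    cases xs with
    | nil =>
      simp only [List.nil_append, pvV, List.foldl_cons, List.foldl_nil]
      rw [Nat.toDigits_of_lt_base (by simpa using hdv)]
      simp only [Nat.zero_mul, Nat.zero_add, pvDv]
      rw [pvDigitChar_dv d hd]
    | cons x xs' =>
      have hcx : pvCanon (x :: xs') := by
        refine ⟨fun c hc => hdig c ?_, by simp, by simpa using hh⟩
        rcases List.mem_cons.mp hc with h | h
        · simp [h]
        · simp [h]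
      have hpos := pvV_pos _ hcx
      rw [pvV_append]
      rw [Nat.toDigits_of_base_le (by norm_num) (by omega)]
      have hdiv : (pvV 0 (x :: xs') * 10 + pvDv d) / 10 = pvV 0 (x :: xs') := by omega
      have hmod : (pvV 0 (x :: xs') * 10 + pvDv d) % 10 = pvDv d := by omega
      rw [hdiv, hmod, ih hcx]
      simp only [pvDv]
      rw [pvDigitChar_dv d hd]

theorem pvSpace_of_digit (c : Char) (h : c.isDigit) : PySem.Int.isIntSpace c = false := by
  have := pvDigit_toNat c h
  simp [PySem.Int.isIntSpace, Char.ext_iff, UInt32.ext_iff]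
  omega

theorem pvStrip_id (ds : List Char) (h : ∀ c ∈ ds, c.isDigit) :
    (List.dropWhile PySem.Int.isIntSpace
      (List.dropWhile PySem.Int.isIntSpace ds).reverse).reverse = ds := by
  have h1 : List.dropWhile PySem.Int.isIntSpace ds = ds := by
    apply List.dropWhile_eq_self_iff.mpr
    intro hl
    simp [pvSpace_of_digit _ (h _ (List.getElem_mem hl))]
  rw [h1]
  have h2 : List.dropWhile PySem.Int.isIntSpace ds.reverse = ds.reverse := by
    apply List.dropWhile_eq_self_iff.mpr
    intro hl
    simp only [Bool.not_eq_true]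
    exact pvSpace_of_digit _ (h _ (List.mem_reverse.mp (List.getElem_mem hl)))
  rw [h2, List.reverse_reverse]

-- replica of ofChars?'s shape used to capture its private digit-parsing helper by unification
def pvWrap (g : List Char → Bool → Nat → Option Nat) (s : List Char) : Option Int :=
  match (List.dropWhile PySem.Int.isIntSpace (List.dropWhile PySem.Int.isIntSpace s).reverse).reverse with
  | '-' :: ds =>
    Option.map (fun n => -n) do
      let a ← (match ds with | [] => none | cs' => g cs' false 0)
      pure (a : Int)
  | '+' :: ds =>
    Option.map (fun n => n) do
      let a ← (match ds with | [] => none | cs' => g cs' false 0)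
      pure (a : Int)
  | ds =>
    Option.map (fun n => n) do
      let a ← (match ds with | [] => none | cs' => g cs' false 0)
      pure (a : Int)

theorem pvCap : ∃ g, PySem.Int.ofChars? = pvWrap g ∧
    (∀ b a, g [] b a = if b then some a else none) ∧
    (∀ c cs b a, c.isDigit = true → g (c :: cs) b a = g cs true (a * 10 + (c.toNat - '0'.toNat))) := by
  refine ⟨_, rfl, ?_, ?_⟩
  · intro b a; cases b <;> rfl
  · intro c cs b a hc
    change (if c.isDigit = true then _ else _) = _
    rw [hc]
    simp only [if_true]

theorem pvOC1 (ds : List Char) (h : ∀ c ∈ ds, c.isDigit) (hne : ds ≠ []) :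
    PySem.Int.ofChars? ds = some ((pvV 0 ds : Nat) : Int) := by
  obtain ⟨g, hw, hnil, hcons⟩ := pvCap
  have aux : ∀ (cs : List Char) (a : Nat), (∀ x ∈ cs, x.isDigit = true) →
      g cs true a = some (pvV a cs) := by
    intro cs
    induction cs with
    | nil => intro a _; simpa [pvV] using hnil true a
    | cons d dsx ih =>
      intro a hd
      rw [hcons d dsx true a (hd d (by simp))]
      rw [ih _ (fun x hx => hd x (by simp [hx]))]
      simp [pvV, pvDv]
  obtain ⟨c, cs, rfl⟩ : ∃ c cs, ds = c :: cs := by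
    cases ds with
    | nil => exact absurd rfl hne
    | cons a b => exact ⟨a, b, rfl⟩
  have hc : c.isDigit := h c (by simp)
  rw [hw]
  unfold pvWrap
  rw [pvStrip_id _ h]
  split
  · rename_i ds' heq
    exfalso
    obtain ⟨h1, -⟩ := List.cons.inj heq
    have := pvDigit_toNat c hc; subst h1; revert this; decide
  · rename_i ds' heq
    exfalso
    obtain ⟨h1, -⟩ := List.cons.inj heq
    have := pvDigit_toNat c hc; subst h1; revert this; decide
  · have hred : (match c :: cs with | [] => none | cs' => g cs' false 0) = g (c :: cs) false 0 := rfl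
    rw [hred, hcons c cs false 0 hc]
    rw [aux cs _ (fun x hx => h x (by simp [hx]))]
    simp [pvV, pvDv]

-- str(n) for 0 ≤ n is the base-10 digits of n
theorem pvToChars_nonneg (m : Int) (h : 0 ≤ m) :
    PySem.Int.toChars m = Nat.toDigits 10 m.toNat := by
  unfold PySem.Int.toChars
  rw [if_neg (by omega)]

-- roundtrip: int(str(m)) = m for 0 ≤ m
theorem pvF1 (m : Int) (h : 0 ≤ m) :
    PySem.Int.ofChars? (PySem.Int.toChars m) = some m := by
  rw [pvToChars_nonneg m h]
  rw [pvOC1 _ (pvTD_digits _) (pvTD_ne_nil _)]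
  rw [pvTD_V]
  congr 1
  omega

theorem pvKeyIff (year : Int) (hy : 0 < year) (r : List Char) (hc : pvCanon r) :
    (PySem.Int.ofChars? r = some year) ↔ r = PySem.Int.toChars year := by
  constructor
  · intro h
    rw [pvOC1 r hc.1 hc.2.1] at h
    have hv : (pvV 0 r : Int) = year := by simpa using h
    rw [pvToChars_nonneg year (by omega), ← pvCanon_toDigits r hc]
    congr 1
    omega
  · intro h
    rw [h]
    exact pvF1 year (by omega)
theorem pvBuild_prefix (digits : Nat) (cand : List Char) (c : Int) :
    cand <+: pvBuild digits cand c := by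
  fun_induction pvBuild with
  | case1 cand c h ih =>
    exact List.IsPrefix.trans (List.prefix_append _ _) ih
  | case2 => exact List.prefix_refl _

theorem pvBuild_digits (digits : Nat) (cand : List Char) (c : Int) :
    (∀ x ∈ cand, x.isDigit) → 0 ≤ c →
    ∀ x ∈ pvBuild digits cand c, x.isDigit := by
  fun_induction pvBuild with
  | case1 cand c h ih =>
    intro hd hc
    apply ih
    · intro x hx
      rcases List.mem_append.mp hx with h1 | h2
      · exact hd x h1
      · rw [pvToChars_nonneg (c + 1) (by omega)] at h2
        exact pvTD_digits _ x h2
    · omega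
  | case2 cand c h =>
    intro hd hc
    exact hd

-- head of a nonempty prefix is the head of the whole list
theorem pvHead_of_prefix {p r : List Char} (h : p <+: r) (hne : p ≠ []) :
    r.head? = p.head? := by
  obtain ⟨u, rfl⟩ := h
  exact List.head?_append_of_ne_nil _ hne

-- the core invariant: A's candidate-building check agrees with B's in-place matcher
theorem pvE (year : Int) (hy : 10 ≤ year) :
    ∀ (k : Nat) (c : Int) (idx : Nat),
      (PySem.Int.toChars year).length - idx = k → 0 ≤ c →
      idx ≤ (PySem.Int.toChars year).length →
      ((PySem.Int.ofChars? (pvBuild (PySem.Int.toChars year).length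
          ((PySem.Int.toChars year).take idx) c) = some year) ↔
        ((PySem.Int.toChars year).length ≤
          pvMatch (PySem.Int.toChars year) (PySem.Int.toChars year).length (c + 1) idx)) := by
  set s := PySem.Int.toChars year with hs
  set n := s.length with hn
  have hsd : ∀ x ∈ s, x.isDigit := by
    rw [hs, pvToChars_nonneg year (by omega)]
    exact pvTD_digits _
  have hsc : pvCanon s := by
    rw [hs, pvToChars_nonneg year (by omega)]
    exact pvTD_canon _ (by omega)
  intro k
  induction k using Nat.strong_induction_on with
  | _ k ih =>
    intro c idx hk hc hidx
    by_cases hlt : idx < n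
    · -- unfold pvBuild once
      have hlen : (s.take idx).length = idx := by
        rw [List.length_take]; omega
      rw [pvBuild]
      rw [dif_pos (by rw [hlen]; exact hlt)]
      -- unfold pvMatch once
      rw [pvMatch]
      rw [dif_pos hlt]
      simp only []
      set t := PySem.Int.toChars (c + 1) with ht
      have htd : ∀ x ∈ t, x.isDigit := by
        rw [ht, pvToChars_nonneg (c + 1) (by omega)]
        exact pvTD_digits _
      have htne : t ≠ [] := pvToChars_ne_nil _
      have htpos : 0 < t.length := List.length_pos_iff.mpr htne
      have hslice : PySem.List.slice s (some (idx : Int)) (some ((idx : Int) + (t.length : Int)))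
          = List.take t.length (s.drop idx) := by
        have : ((idx : Int) + (t.length : Int)) = ((idx + t.length : Nat) : Int) := by push_cast; ring
        rw [this, PySem.List.slice_natCast]
        congr 1
        omega
      rw [hslice]
      by_cases hm : List.take t.length (s.drop idx) = t
      · -- matched: step both sides via IH
        have hlent : t.length ≤ n - idx := by
          have := congrArg List.length hm
          simp only [List.length_take, List.length_drop] at this
          omega
        have htake : s.take idx ++ t = s.take (idx + t.length) := by
          rw [List.take_add, hm]
        rw [if_pos hm, htake]
        exact ih (n - (idx + t.length)) (by omega) (c + 1) (idx + t.length)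
          rfl (by omega) (by omega)
      · -- mismatch: B fails here; A's candidate can never equal str(year)
        rw [if_neg hm]
        constructor
        · intro hofc
          exfalso
          have hpre : (s.take idx ++ t) <+: pvBuild n (s.take idx ++ t) (c + 1) :=
            pvBuild_prefix _ _ _
          have hrd : ∀ x ∈ pvBuild n (s.take idx ++ t) (c + 1), x.isDigit := by
            apply pvBuild_digits
            · intro x hx
              rcases List.mem_append.mp hx with h1 | h2
              · exact hsd x (List.mem_of_mem_take h1)
              · exact htd x h2
            · omega
          have hrne : pvBuild n (s.take idx ++ t) (c + 1) ≠ [] := by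
            intro hnil
            rw [hnil] at hpre
            have h0 := List.prefix_nil.mp hpre
            rcases List.append_eq_nil_iff.mp h0 with ⟨-, h2⟩
            exact htne h2
          have hrhead : (pvBuild n (s.take idx ++ t) (c + 1)).head? ≠ some '0' := by
            rw [pvHead_of_prefix hpre (by simp [htne])]
            cases hi : idx with
            | zero =>
              simp only [List.take_zero, List.nil_append]
              rw [ht, pvToChars_nonneg (c + 1) (by omega)]
              exact pvTD_head _ (by omega)
            | succ j =>
              rw [List.head?_append_of_ne_nil]
              · have h1 : (s.take (j + 1)).head? = s.head? := by
                  obtain ⟨c0, cs0, hsx⟩ := List.exists_cons_of_ne_nil hsc.2.1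
                  rw [hsx]
                  simp
                rw [h1]
                exact hsc.2.2
              · intro hnil
                have hmin : min (j + 1) s.length = 0 := by
                  simpa using congrArg List.length hnil
                omega
          have hr : pvBuild n (s.take idx ++ t) (c + 1) = s :=
            (pvKeyIff year (by omega) _ ⟨hrd, hrne, hrhead⟩).mp hofc
          rw [hr] at hpre
          obtain ⟨u, hu⟩ := hpre
          rw [List.append_assoc] at hu
          have hdrop : s.drop idx = t ++ u := by
            rw [← hu, List.drop_left' hlen]
          apply hm
          rw [hdrop, List.take_left' rfl]
        · intro hle
          exfalso
          omega
    · -- idx = n: both sides are true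
      have hidxn : idx = n := by omega
      rw [pvMatch, dif_neg hlt]
      subst hidxn
      rw [List.take_length]
      rw [pvBuild, dif_neg (by omega)]
      simp only [hn, Nat.le_refl, iff_true]
      exact pvF1 year (by omega)

theorem pvLen_ge_two_imp (year : Int) (hy0 : 0 ≤ year)
    (h2 : 2 ≤ (PySem.Int.toChars year).length) : 10 ≤ year := by
  by_contra hlt
  have h10 : year.toNat < 10 := by omega
  rw [pvToChars_nonneg year hy0, Nat.toDigits_of_lt_base h10] at h2
  simp at h2

theorem pvPerL (year : Int) (hy0 : 0 ≤ year) (l : Int) (hl1 : 1 ≤ l)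
    (hl2 : l < ((PySem.Int.toChars year).length : Int)) (c : Int)
    (hc : PySem.Int.ofChars? (PySem.List.slice (PySem.Int.toChars year) none (some l)) = some c) :
    ((PySem.Int.ofChars? (pvBuild (PySem.Int.toChars year).length (PySem.Int.toChars c) c) = some year) ↔
      ((PySem.Int.toChars year).length ≤
        pvMatch (PySem.Int.toChars year) (PySem.Int.toChars year).length c 0)) := by
  set s := PySem.Int.toChars year with hs
  set n := s.length with hn
  have hn2 : 2 ≤ n := by omega
  have hy : 10 ≤ year := pvLen_ge_two_imp year hy0 hn2
  have hsd : ∀ x ∈ s, x.isDigit := by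
    rw [hs, pvToChars_nonneg year (by omega)]; exact pvTD_digits _
  have hsc : pvCanon s := by
    rw [hs, pvToChars_nonneg year (by omega)]; exact pvTD_canon _ (by omega)
  set l' := l.toNat with hl'
  have hlc : l = ((l' : Nat) : Int) := (Int.toNat_of_nonneg (by omega)).symm
  have hl'1 : 1 ≤ l' := by omega
  have hl'n : l' < n := by omega
  have hslice : PySem.List.slice s none (some l) = s.take l' := by
    rw [hlc, PySem.List.slice_to_natCast]
  rw [hslice] at hc
  have hpd : ∀ x ∈ s.take l', x.isDigit := fun x hx => hsd x (List.mem_of_mem_take hx)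
  have hpne : s.take l' ≠ [] := by
    intro hnil
    have hmin : min l' s.length = 0 := by simpa using congrArg List.length hnil
    have hnn : n = s.length := rfl
    omega
  have hphead : (s.take l').head? ≠ some '0' := by
    obtain ⟨c0, cs0, hsx⟩ := List.exists_cons_of_ne_nil hsc.2.1
    obtain ⟨j, hj⟩ : ∃ j, l' = j + 1 := ⟨l' - 1, by omega⟩
    rw [hsx, hj]
    simp only [List.take_succ_cons, List.head?_cons]
    rw [hsx] at hsc
    simpa using hsc.2.2
  have hpc : pvCanon (s.take l') := ⟨hpd, hpne, hphead⟩
  rw [pvOC1 _ hpd hpne] at hc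
  have hcv : c = ((pvV 0 (s.take l') : Nat) : Int) := by
    exact (Option.some.injEq _ _).mp hc.symm
  have hc0 : 0 ≤ c := by rw [hcv]; positivity
  have htc : PySem.Int.toChars c = s.take l' := by
    rw [pvToChars_nonneg c hc0, hcv]
    rw [show (((pvV 0 (s.take l') : Nat) : Int)).toNat = pvV 0 (s.take l') by omega]
    exact pvCanon_toDigits _ hpc
  have hlenp : (s.take l').length = l' := by
    rw [List.length_take]; omega
  have hmatch0 : pvMatch s n c 0 = pvMatch s n (c + 1) l' := by
    rw [pvMatch, dif_pos (by omega)]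
    simp only []
    rw [htc]
    have hsl : PySem.List.slice s (some ((0 : Nat) : Int))
        (some (((0 : Nat) : Int) + ((s.take l').length : Int))) = s.take l' := by
      rw [show (((0 : Nat) : Int) + ((s.take l').length : Int)) = (((s.take l').length : Nat) : Int) by push_cast; ring]
      rw [PySem.List.slice_natCast]
      rw [hlenp]
      simp
    rw [show ((0 : Int)) = ((0 : Nat) : Int) by simp] at *
    rw [hsl, if_pos rfl, hlenp]
    simp
  rw [hmatch0, htc]
  have hlen_eq : (PySem.Int.toChars year).length = n := rfl
  exact pvE year hy (n - l') c l' (by omega) hc0 (by omega)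

theorem pvLoops (year : Int) (hy0 : 0 ≤ year) (ls : List Int)
    (hb : ∀ l ∈ ls, 1 ≤ l ∧ l < ((PySem.Int.toChars year).length : Int)) :
    pvLoopA year (PySem.Int.toChars year) (PySem.Int.toChars year).length ls =
    pvLoopB (PySem.Int.toChars year) (PySem.Int.toChars year).length ls := by
  induction ls with
  | nil => rfl
  | cons l ls ih =>
    obtain ⟨hl1, hl2⟩ := hb l (by simp)
    rw [pvLoopA, pvLoopB]
    cases hc : PySem.Int.ofChars? (PySem.List.slice (PySem.Int.toChars year) none (some l)) with
    | none => rfl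
    | some c =>
      simp only []
      have hiff := pvPerL year hy0 l hl1 hl2 c hc
      by_cases hcond : PySem.Int.ofChars? (pvBuild (PySem.Int.toChars year).length (PySem.Int.toChars c) c) = some year
      · rw [if_pos hcond, if_pos (hiff.mp hcond)]
      · rw [if_neg hcond, if_neg (fun hx => hcond (hiff.mpr hx))]
        exact ih (fun x hx => hb x (by simp [hx]))

theorem pvMain (year : Int) (hy0 : 0 ≤ year) : is_roaring year = is_roaring_alt year := by
  rw [is_roaring, is_roaring_alt]
  apply pvLoops year hy0
  intro l hl
  exact PySem.List.mem_pyRange_one.mp hl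


-- ===== VERDICT (by name: the statement is the Claim_ definition above) =====
theorem is_roaring_spec : Claim_equal_is_roaring := by
  intro year hdom hpre
  unfold Spec_is_roaring
  exact pvMain year hpre
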